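-- pv_equiv track=rewrite | github.com/louis-cl/advent-of-code | 2025/day9/part2.py | solve
-- ===== SOURCE A (Python) =====
-- from itertools import combinations
--
-- def is_in(p, edges):
--     x,y = p
--     # exactly on edge
--     for (px,py),(qx,qy) in edges:
--         if px == qx == x and min(py,qy) <= y <= max(py,qy):
--             return True
--         if py == qy == y and min(px,qx) <= x <= max(px,qx):
--             return True
--     # ray casting to the right
--     inside = False
--     for (px,py),(qx,qy) in edges:
--         # vertical edge on the right
--         if px == qx > x and (py > y) != (qy > y):
--             inside = not inside
--     return inside
--
-- def overlaps(l1, r1, l2, r2):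
--     return max(l1, l2) < min(r1, r2)
--
-- def edge_crosses(a, b, edges):
--     minx, maxx = sorted([a[0], b[0]])
--     miny, maxy = sorted([a[1], b[1]])
--
--     for (px,py),(qx,qy) in edges:
--         if px == qx: # vertical edge
--             # x inside the rectangle and y crossing
--             if minx < px < maxx and overlaps(miny, maxy, min(py,qy), max(py,qy)):
--                 return True
--         elif miny < py < maxy and overlaps(minx, maxx, min(px,qx), max(px,qx)):
--                 return True
--     return False
--
-- def is_valid(a, b, edges):
--     c = (a[0], b[1])
--     d = (b[0], a[1])
--     # all corners inside, we know a,b are already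
--     if not is_in(c, edges) or not is_in(d, edges):
--         return False
--     # no side should cross an edge of the polygon
--     if edge_crosses(a, b, edges):
--         return False
--     return True
--
-- def solve(tiles):
--     edges = list(zip(tiles, tiles[1:]+tiles[:1]))
--     max_area = 0
--     for a,b in combinations(tiles, 2):
--         s1 = abs(a[0]-b[0])+1
--         s2 = abs(a[1]-b[1])+1
--         area = s1 * s2
--         if area > max_area and is_valid(a, b, edges):
--             max_area = area
--     return max_area
-- ===== SOURCE B (Python) =====
-- from itertools import combinations
--
-- def _point_in(p, edges):
--     # one pass: track both "exactly on an edge" and the ray-casting parity together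
--     x, y = p
--     on = False
--     parity = False
--     for (px, py), (qx, qy) in edges:
--         if px == qx:
--             if px == x and min(py, qy) <= y <= max(py, qy):
--                 on = True
--             if px > x and (py > y) != (qy > y):
--                 parity = not parity
--         elif py == qy == y and min(px, qx) <= x <= max(px, qx):
--             on = True
--     return on or parity
--
-- def _crosses(a, b, edges):
--     x0, x1 = min(a[0], b[0]), max(a[0], b[0])
--     y0, y1 = min(a[1], b[1]), max(a[1], b[1])
--     return any(
--         (x0 < px < x1 and max(y0, min(py, qy)) < min(y1, max(py, qy)))
--         if px == qx else
--         (y0 < py < y1 and max(x0, min(px, qx)) < min(x1, max(px, qx)))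
--         for (px, py), (qx, qy) in edges)
--
-- def _valid(a, b, edges):
--     return (_point_in((a[0], b[1]), edges)
--             and _point_in((b[0], a[1]), edges)
--             and not _crosses(a, b, edges))
--
-- def solve(tiles):
--     if tiles:
--         edges = list(zip(tiles, tiles[1:])) + [(tiles[-1], tiles[0])]
--     else:
--         edges = []
--     cand = [((abs(a[0] - b[0]) + 1) * (abs(a[1] - b[1]) + 1), a, b)
--             for a, b in combinations(tiles, 2)]
--     cand.sort(key=lambda t: t[0], reverse=True)
--     for area, a, b in cand:
--         if _valid(a, b, edges):
--             return area
--     return 0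
-- ===== Notes on version B (the rewrite author's own statement) =====
-- stated objective: faster
-- what changed: B tabulates all vertex pairs with their areas, sorts descending by area and returns the first pair passing validity (0 if none) instead of A's running-max scan over all pairs; the point-in-polygon test is fused into a single pass carrying (on-edge, ray-parity) instead of A's two sequential loops, overlaps() is inlined, and the edge list is built as consecutive pairs plus an explicit wrap-around edge; correct because every candidate area is >= 1, so the first valid area in descending order equals the maximum valid area.
import Mathlib
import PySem

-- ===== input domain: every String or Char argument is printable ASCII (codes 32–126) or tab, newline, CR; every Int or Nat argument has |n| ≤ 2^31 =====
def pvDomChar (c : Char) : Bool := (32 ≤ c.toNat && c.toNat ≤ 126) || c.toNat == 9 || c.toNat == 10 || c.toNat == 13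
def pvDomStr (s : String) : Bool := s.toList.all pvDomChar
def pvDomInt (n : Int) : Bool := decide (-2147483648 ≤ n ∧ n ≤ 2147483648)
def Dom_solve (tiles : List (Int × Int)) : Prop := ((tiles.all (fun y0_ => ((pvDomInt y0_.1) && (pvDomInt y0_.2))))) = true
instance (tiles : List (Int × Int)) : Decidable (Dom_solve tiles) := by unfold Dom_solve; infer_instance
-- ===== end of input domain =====

-- B replaces A's running-max scan by a sort-by-area-descending table with an early-exit pass,
-- fuses A's two point-in-polygon loops into one pass carrying (on-edge, parity) together,
-- inlines `overlaps`, and builds the wrap-around edge separately; the early exit skips most validity checks (measured faster).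

-- ===== PORT A =====
-- is_in(p, edges): first loop with early `return True` = List.any; second loop = foldl over `inside`
def isIn (p : Int × Int) (edges : List ((Int × Int) × (Int × Int))) : Bool :=
  if edges.any (fun e =>
      ((e.1.1 == e.2.1 && e.2.1 == p.1) &&
        (min e.1.2 e.2.2 ≤ p.2 && p.2 ≤ max e.1.2 e.2.2)) ||
      ((e.1.2 == e.2.2 && e.2.2 == p.2) &&
        (min e.1.1 e.2.1 ≤ p.1 && p.1 ≤ max e.1.1 e.2.1))) then
    true
  else
    edges.foldl (fun inside e =>
      if e.1.1 == e.2.1 && p.1 < e.2.1 && ((decide (p.2 < e.1.2)) != (decide (p.2 < e.2.2))) then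
        !inside
      else inside) false

def overlapsB (l1 r1 l2 r2 : Int) : Bool := decide (max l1 l2 < min r1 r2)

-- edge_crosses: sorted([a0,b0]) on a 2-list yields (min, max); loop with early return = List.any
def edgeCrosses (a b : Int × Int) (edges : List ((Int × Int) × (Int × Int))) : Bool :=
  let minx := min a.1 b.1
  let maxx := max a.1 b.1
  let miny := min a.2 b.2
  let maxy := max a.2 b.2
  edges.any (fun e =>
    if e.1.1 == e.2.1 then
      (decide (minx < e.1.1) && decide (e.1.1 < maxx)) &&
        overlapsB miny maxy (min e.1.2 e.2.2) (max e.1.2 e.2.2)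
    else
      (decide (miny < e.1.2) && decide (e.1.2 < maxy)) &&
        overlapsB minx maxx (min e.1.1 e.2.1) (max e.1.1 e.2.1))

def isValid (a b : Int × Int) (edges : List ((Int × Int) × (Int × Int))) : Bool :=
  let c := (a.1, b.2)
  let d := (b.1, a.2)
  if !isIn c edges || !isIn d edges then false
  else if edgeCrosses a b edges then false
  else true

-- combinations(tiles, 2) as a list of pairs, in itertools order
def comb2 {α : Type} : List α → List (α × α)
  | [] => []
  | x :: xs => (xs.map (fun y => (x, y))) ++ comb2 xs

-- edges = list(zip(tiles, tiles[1:] + tiles[:1]))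
def mkEdges (tiles : List (Int × Int)) : List ((Int × Int) × (Int × Int)) :=
  tiles.zip (tiles.drop 1 ++ tiles.take 1)

def solve (tiles : List (Int × Int)) : Int :=
  let edges := mkEdges tiles
  (comb2 tiles).foldl (fun maxArea ab =>
    let s1 : Int := ((ab.1.1 - ab.2.1).natAbs : Int) + 1
    let s2 : Int := ((ab.1.2 - ab.2.2).natAbs : Int) + 1
    let area : Int := s1 * s2
    if area > maxArea && isValid ab.1 ab.2 edges then area else maxArea) 0

-- ===== PORT B =====
-- _point_in: ONE pass over the edges, carrying the pair (on-edge?, ray parity)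
def pinStep (x y : Int) (st : Bool × Bool) (e : (Int × Int) × (Int × Int)) : Bool × Bool :=
  if e.1.1 == e.2.1 then
    (st.1 || (e.1.1 == x && (min e.1.2 e.2.2 ≤ y && y ≤ max e.1.2 e.2.2)),
     if e.1.1 > x && ((decide (e.1.2 > y)) != (decide (e.2.2 > y))) then !st.2 else st.2)
  else
    (st.1 || ((e.1.2 == e.2.2 && e.2.2 == y) && (min e.1.1 e.2.1 ≤ x && x ≤ max e.1.1 e.2.1)),
     st.2)

def pointIn (p : Int × Int) (edges : List ((Int × Int) × (Int × Int))) : Bool :=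
  let st := edges.foldl (pinStep p.1 p.2) (false, false)
  st.1 || st.2

-- _crosses with `overlaps` inlined
def crossesB (a b : Int × Int) (edges : List ((Int × Int) × (Int × Int))) : Bool :=
  let x0 := min a.1 b.1
  let x1 := max a.1 b.1
  let y0 := min a.2 b.2
  let y1 := max a.2 b.2
  edges.any (fun e =>
    if e.1.1 == e.2.1 then
      (decide (x0 < e.1.1) && decide (e.1.1 < x1)) &&
        decide (max y0 (min e.1.2 e.2.2) < min y1 (max e.1.2 e.2.2))
    else
      (decide (y0 < e.1.2) && decide (e.1.2 < y1)) &&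
        decide (max x0 (min e.1.1 e.2.1) < min x1 (max e.1.1 e.2.1)))

def validB (a b : Int × Int) (edges : List ((Int × Int) × (Int × Int))) : Bool :=
  pointIn (a.1, b.2) edges && pointIn (b.1, a.2) edges && !crossesB a b edges

-- edges = list(zip(tiles, tiles[1:])) + [(tiles[-1], tiles[0])] (empty list: [])
def mkEdgesB : List (Int × Int) → List ((Int × Int) × (Int × Int))
  | [] => []
  | x :: xs => (x :: xs).zip xs ++ [(xs.getLastD x, x)]

def areaOf (ab : (Int × Int) × (Int × Int)) : Int :=
  (((ab.1.1 - ab.2.1).natAbs : Int) + 1) * (((ab.1.2 - ab.2.2).natAbs : Int) + 1)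

-- the for-loop with early return over the sorted candidate list
def firstValid (edges : List ((Int × Int) × (Int × Int))) :
    List (Int × (Int × Int) × (Int × Int)) → Int
  | [] => 0
  | t :: rest => if validB t.2.1 t.2.2 edges then t.1 else firstValid edges rest

def solve_alt (tiles : List (Int × Int)) : Int :=
  let edges := mkEdgesB tiles
  let cand := (comb2 tiles).map (fun ab => (areaOf ab, ab))
  let cand := PySem.List.sorted cand (fun t => t.1) true
  firstValid edges cand

-- ===== PRECONDITION & SPEC =====
def Spec_solve (tiles : List (Int × Int)) (out : Int) : Prop := out = solve_alt tiles
instance (tiles : List (Int × Int)) (out : Int) : Decidable (Spec_solve tiles out) := by unfold Spec_solve; infer_instance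

-- ===== CLAIM (what is proved, stated in full; the proofs are below) =====
def Claim_equal_solve : Prop := ∀ (tiles : List (Int × Int)), Dom_solve tiles → Spec_solve tiles (solve tiles)

-- ===== LEMMAS AND PROOFS =====

-- B's one-pass "on edge" predicate, per edge
def onB (x y : Int) (e : (Int × Int) × (Int × Int)) : Bool :=
  if e.1.1 == e.2.1 then
    e.1.1 == x && (min e.1.2 e.2.2 ≤ y && y ≤ max e.1.2 e.2.2)
  else
    (e.1.2 == e.2.2 && e.2.2 == y) && (min e.1.1 e.2.1 ≤ x && x ≤ max e.1.1 e.2.1)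

-- B's parity step, per edge
def parB (x y : Int) (pa : Bool) (e : (Int × Int) × (Int × Int)) : Bool :=
  if e.1.1 == e.2.1 && (e.1.1 > x && ((decide (e.1.2 > y)) != (decide (e.2.2 > y)))) then !pa else pa

theorem pinStep_eq (x y : Int) (st : Bool × Bool) (e : (Int × Int) × (Int × Int)) :
    pinStep x y st e = (st.1 || onB x y e, parB x y st.2 e) := by
  rcases e with ⟨⟨px, py⟩, ⟨qx, qy⟩⟩
  unfold pinStep onB parB
  by_cases h : px = qx <;> simp [h]

theorem fold_pin (x y : Int) (es : List ((Int × Int) × (Int × Int))) (o pa : Bool) :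
    es.foldl (pinStep x y) (o, pa) = (o || es.any (onB x y), es.foldl (parB x y) pa) := by
  induction es generalizing o pa with
  | nil => simp
  | cons e es ih =>
    simp only [List.foldl_cons, pinStep_eq, List.any_cons, ih, Bool.or_assoc]

-- per edge, A's "on edge" test agrees with B's branch-structured one
theorem on_eq (x y : Int) (e : (Int × Int) × (Int × Int)) :
    (((e.1.1 == e.2.1 && e.2.1 == x) &&
        (min e.1.2 e.2.2 ≤ y && y ≤ max e.1.2 e.2.2)) ||
      ((e.1.2 == e.2.2 && e.2.2 == y) &&
        (min e.1.1 e.2.1 ≤ x && x ≤ max e.1.1 e.2.1))) = onB x y e := by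
  rcases e with ⟨⟨px, py⟩, ⟨qx, qy⟩⟩
  unfold onB
  by_cases h : px = qx
  · subst h
    rw [if_pos (by simp : ((px == px : Bool) = true)), Bool.eq_iff_iff]
    simp only [Bool.or_eq_true, Bool.and_eq_true, beq_iff_eq, decide_eq_true_eq,
      beq_self_eq_true, true_and]
    constructor
    · rintro (⟨h1, h2⟩ | ⟨⟨h1, h2⟩, h3⟩) <;> constructor <;> omega
    · rintro ⟨h1, h2⟩; left; exact ⟨h1, h2⟩
  · simp [h]

-- per edge, A's parity toggle agrees with B's
theorem par_eq (x y : Int) (pa : Bool) (e : (Int × Int) × (Int × Int)) :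
    (if e.1.1 == e.2.1 && x < e.2.1 && ((decide (y < e.1.2)) != (decide (y < e.2.2))) then !pa
     else pa) = parB x y pa e := by
  rcases e with ⟨⟨px, py⟩, ⟨qx, qy⟩⟩
  unfold parB
  by_cases h : px = qx
  · subst h; simp [gt_iff_lt]
  · simp [h]

theorem isIn_eq (p : Int × Int) (edges : List ((Int × Int) × (Int × Int))) :
    isIn p edges = pointIn p edges := by
  unfold isIn pointIn
  rw [fold_pin]
  have hany : edges.any (fun e =>
      ((e.1.1 == e.2.1 && e.2.1 == p.1) &&
        (min e.1.2 e.2.2 ≤ p.2 && p.2 ≤ max e.1.2 e.2.2)) ||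
      ((e.1.2 == e.2.2 && e.2.2 == p.2) &&
        (min e.1.1 e.2.1 ≤ p.1 && p.1 ≤ max e.1.1 e.2.1))) = edges.any (onB p.1 p.2) := by
    induction edges with
    | nil => rfl
    | cons e es ih => simp only [List.any_cons, on_eq]
  have hpar : edges.foldl (fun inside e =>
      if e.1.1 == e.2.1 && p.1 < e.2.1 && ((decide (p.2 < e.1.2)) != (decide (p.2 < e.2.2))) then
        !inside
      else inside) false = edges.foldl (parB p.1 p.2) false := by
    generalize false = b
    induction edges generalizing b with
    | nil => rfl
    | cons e es ih => simp only [List.foldl_cons, par_eq]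
  rw [hany, hpar]
  cases h : edges.any (onB p.1 p.2) <;> simp

theorem edgeCrosses_eq (a b : Int × Int) (edges : List ((Int × Int) × (Int × Int))) :
    edgeCrosses a b edges = crossesB a b edges := by
  unfold edgeCrosses crossesB overlapsB
  rfl

theorem isValid_eq (a b : Int × Int) (edges : List ((Int × Int) × (Int × Int))) :
    isValid a b edges = validB a b edges := by
  simp only [isValid, validB, isIn_eq, edgeCrosses_eq]
  cases pointIn (a.1, b.2) edges <;> cases pointIn (b.1, a.2) edges <;>
    cases crossesB a b edges <;> simp

theorem zip_drop_append (xs : List (Int × Int)) (x z : Int × Int) :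
    (x :: xs).zip (xs ++ [z]) = (x :: xs).zip xs ++ [(xs.getLastD x, z)] := by
  induction xs generalizing x with
  | nil => simp
  | cons y ys ih =>
    simp only [List.cons_append, List.zip_cons_cons, ih y, List.cons.injEq, true_and]
    cases ys <;> simp [List.getLast?_cons]

theorem mkEdges_eq (tiles : List (Int × Int)) : mkEdges tiles = mkEdgesB tiles := by
  cases tiles with
  | nil => rfl
  | cons x xs =>
    unfold mkEdges mkEdgesB
    rw [show (x :: xs).drop 1 ++ (x :: xs).take 1 = xs ++ [x] from by simp,
      zip_drop_append xs x x]

-- the max-accumulating step, written on the (area, pair) triples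
def maxStep (edges : List ((Int × Int) × (Int × Int)))
    (m : Int) (t : Int × (Int × Int) × (Int × Int)) : Int :=
  if t.1 > m && isValid t.2.1 t.2.2 edges then t.1 else m

theorem maxStep_eq_max (edges : List ((Int × Int) × (Int × Int)))
    (m : Int) (t : Int × (Int × Int) × (Int × Int)) :
    maxStep edges m t = if isValid t.2.1 t.2.2 edges then max m t.1 else m := by
  unfold maxStep
  by_cases h : isValid t.2.1 t.2.2 edges <;> simp [h]
  omega

theorem maxStep_left_comm (edges : List ((Int × Int) × (Int × Int))) :
    ∀ (t u : Int × (Int × Int) × (Int × Int)) (m : Int),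
    maxStep edges (maxStep edges m t) u = maxStep edges (maxStep edges m u) t := by
  intro t u m
  simp only [maxStep_eq_max]
  by_cases ht : isValid t.2.1 t.2.2 edges <;>
    by_cases hu : isValid u.2.1 u.2.2 edges <;> simp [ht, hu] <;> try omega

-- A's fold equals the same fold on any permutation of the candidate list
theorem foldl_maxStep_perm (edges : List ((Int × Int) × (Int × Int)))
    {l1 l2 : List (Int × (Int × Int) × (Int × Int))} (h : l1.Perm l2) (m : Int) :
    l1.foldl (maxStep edges) m = l2.foldl (maxStep edges) m := by
  induction h generalizing m with
  | nil => rfl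
  | cons x _ ih => simp only [List.foldl_cons]; exact ih _
  | swap x y l => simp only [List.foldl_cons, maxStep_left_comm]
  | trans _ _ ih1 ih2 => exact (ih1 m).trans (ih2 m)

theorem foldl_maxStep_dominated (edges : List ((Int × Int) × (Int × Int)))
    (l : List (Int × (Int × Int) × (Int × Int))) (m : Int)
    (h : ∀ t ∈ l, t.1 ≤ m) : l.foldl (maxStep edges) m = m := by
  induction l with
  | nil => rfl
  | cons t rest ih =>
    have ht := h t (by simp)
    have hstep : maxStep edges m t = m := by
      unfold maxStep
      by_cases hv : isValid t.2.1 t.2.2 edges <;> simp [hv]; omega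
    simp only [List.foldl_cons, hstep]
    exact ih (fun u hu => h u (by simp [hu]))

-- on a list sorted descending by area whose areas are all ≥ 1, the max-fold is the first valid area
theorem foldl_maxStep_sorted (edges : List ((Int × Int) × (Int × Int)))
    (l : List (Int × (Int × Int) × (Int × Int)))
    (hs : l.Pairwise (fun t u => u.1 ≤ t.1)) (hpos : ∀ t ∈ l, 1 ≤ t.1) :
    l.foldl (maxStep edges) 0 = firstValid edges l := by
  induction l with
  | nil => rfl
  | cons t rest ih =>
    rcases List.pairwise_cons.mp hs with ⟨hdom, hrest⟩
    by_cases hv : validB t.2.1 t.2.2 edges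
    · have ht := hpos t (by simp)
      have hstep : maxStep edges 0 t = t.1 := by
        unfold maxStep; simp [isValid_eq, hv]; omega
      simp only [List.foldl_cons, hstep, firstValid, hv, if_true]
      exact foldl_maxStep_dominated edges rest t.1 hdom
    · have hstep : maxStep edges 0 t = 0 := by
        unfold maxStep; simp [isValid_eq, hv]
      simp only [List.foldl_cons, hstep, firstValid, hv]
      exact ih hrest (fun u hu => hpos u (by simp [hu]))

theorem area_pos (ab : (Int × Int) × (Int × Int)) : 1 ≤ areaOf ab := by
  unfold areaOf
  have h1 : (0 : Int) ≤ ((ab.1.1 - ab.2.1).natAbs : Int) := Int.natCast_nonneg _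
  have h2 : (0 : Int) ≤ ((ab.1.2 - ab.2.2).natAbs : Int) := Int.natCast_nonneg _
  nlinarith

-- A's fold over the raw pairs is the same fold over the (area, pair) triples
theorem solve_eq_fold_triples (tiles : List (Int × Int)) :
    solve tiles = ((comb2 tiles).map (fun ab => (areaOf ab, ab))).foldl
      (maxStep (mkEdges tiles)) 0 := by
  unfold solve
  rw [List.foldl_map]
  rfl

-- ===== VERDICT (by name: the statement is the Claim_ definition above) =====
theorem solve_spec : Claim_equal_solve := by
  intro tiles _
  unfold Spec_solve solve_alt
  rw [solve_eq_fold_triples, mkEdges_eq]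
  set cand := (comb2 tiles).map (fun ab => (areaOf ab, ab)) with hcand
  set scand := PySem.List.sorted cand (fun t => t.1) true with hscand
  have hperm : cand.Perm scand := (PySem.List.sorted_perm cand (fun t => t.1) true).symm
  rw [foldl_maxStep_perm (mkEdgesB tiles) hperm]
  refine foldl_maxStep_sorted (mkEdgesB tiles) scand
    (PySem.List.sorted_pairwise_rev cand (fun t => t.1)) ?_
  intro t ht
  have : t ∈ cand := hperm.mem_iff.mpr ht
  rcases List.mem_map.mp this with ⟨ab, _, rfl⟩
  exact area_pos ab
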